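-- pv_equiv track=rewrite | github.com/mariakoren/Kryptografia | laboratorium/lab01/cezar.py | alfaniczny
-- ===== SOURCE A (Python) =====
-- def alfaniczny(a, b, data):
--     szyfrogram = ""
--     for i in data:
--         litera = ord(i)
--         if litera in range(65, 91):
--             litera = litera * a + b
--             while litera > 90:
--                 litera = litera - 26
--         if litera in range(97, 123):
--             litera = litera * a + b
--             while litera > 122:
--                 litera = litera - 26
--         szyfrogram += chr(litera)
--     return szyfrogram
-- ===== SOURCE B (Python) =====
-- def _szyfr(a, b, c):
--     o = ord(c)
--     if 65 <= o <= 90: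
--         v = o * a + b
--         if v > 90:
--             v = (v - 65) % 26 + 65
--         return chr(v)
--     if 97 <= o <= 122:
--         v = o * a + b
--         if v > 122:
--             v = (v - 97) % 26 + 97
--         return chr(v)
--     return None
--
--
-- def alfaniczny(a, b, data):
--     table = {}
--     for c in set(data):
--         e = _szyfr(a, b, c)
--         if e is not None:
--             table[c] = e
--     return ''.join(table.get(c, c) for c in data)
-- ===== Notes on version B (the rewrite author's own statement) =====
-- stated objective: faster
-- what changed: B precomputes a translation table over the distinct characters of data, reducing overflowing codes with a closed-form mod instead of A's repeated-subtraction while loop, then emits the result in one table-lookup pass instead of A's per-character recomputation with quadratic string concatenation.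
import Mathlib
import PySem

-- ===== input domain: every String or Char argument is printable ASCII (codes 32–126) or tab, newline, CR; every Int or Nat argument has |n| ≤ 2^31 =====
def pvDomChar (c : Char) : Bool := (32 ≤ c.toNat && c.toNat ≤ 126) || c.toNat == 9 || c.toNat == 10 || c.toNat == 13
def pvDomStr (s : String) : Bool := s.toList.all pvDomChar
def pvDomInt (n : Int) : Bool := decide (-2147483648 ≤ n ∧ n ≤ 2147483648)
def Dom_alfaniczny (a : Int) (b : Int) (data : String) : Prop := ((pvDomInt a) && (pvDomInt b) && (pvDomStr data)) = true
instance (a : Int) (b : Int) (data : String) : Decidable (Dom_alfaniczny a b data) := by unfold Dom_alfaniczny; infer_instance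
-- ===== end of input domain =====

-- B replaces A's per-character recompute-with-while-loop by a translation table built once over
-- the distinct characters of data (closed-form mod reduction) followed by a single lookup pass (objective: alternative).

-- ===== PORT A =====
-- 'while litera > limit: litera = litera - 26'
def cezarWhile (limit : Int) (v : Int) : Int :=
  if v > limit then cezarWhile limit (v - 26) else v
termination_by (v - limit).toNat
decreasing_by omega

def alfaniczny (a : Int) (b : Int) (data : String) : String :=
  String.ofList (data.toList.foldl (fun (szyfrogram : List Char) i =>
    let litera : Int := i.toNat
    let litera := if 65 ≤ litera ∧ litera < 91 then cezarWhile 90 (litera * a + b) else litera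
    let litera := if 97 ≤ litera ∧ litera < 123 then cezarWhile 122 (litera * a + b) else litera
    szyfrogram ++ [Char.ofNat litera.toNat]) [])

-- ===== PORT B =====
def szyfrChar (a : Int) (b : Int) (c : Char) : Option Char :=
  let o : Int := c.toNat
  if 65 ≤ o ∧ o ≤ 90 then
    let v := o * a + b
    let v := if v > 90 then PySem.Int.mod (v - 65) 26 + 65 else v
    some (Char.ofNat v.toNat)
  else if 97 ≤ o ∧ o ≤ 122 then
    let v := o * a + b
    let v := if v > 122 then PySem.Int.mod (v - 97) 26 + 97 else v
    some (Char.ofNat v.toNat)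
  else none

def alfaniczny_alt (a : Int) (b : Int) (data : String) : String :=
  let table := (PySem.Set.ofList data.toList).foldl
    (fun (t : PySem.Dict Char Char) c =>
      match szyfrChar a b c with
      | some e => t.insert c e
      | none => t) PySem.Dict.empty
  String.ofList (data.toList.map (fun c => table.getD c c))

-- ===== PRECONDITION & SPEC =====
-- Pre_ excludes exactly the inputs where Python raises: chr(v) with v = ord(c)*a + b < 0 for some
-- letter c of data is a ValueError (in A and in B alike).
def Pre_alfaniczny (a : Int) (b : Int) (data : String) : Prop :=
  (data.toList.all fun c =>
    !((65 ≤ c.toNat && c.toNat ≤ 90) || (97 ≤ c.toNat && c.toNat ≤ 122)) ||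
      decide (0 ≤ (c.toNat : Int) * a + b)) = true
instance (a : Int) (b : Int) (data : String) : Decidable (Pre_alfaniczny a b data) := by
  unfold Pre_alfaniczny; infer_instance

def pvWitness_alfaniczny : Int × Int × String := (1, 3, "Az!")

def Spec_alfaniczny (a : Int) (b : Int) (data : String) (out : String) : Prop := out = alfaniczny_alt a b data
instance (a : Int) (b : Int) (data : String) (out : String) : Decidable (Spec_alfaniczny a b data out) := by unfold Spec_alfaniczny; infer_instance

-- ===== CLAIM (what is proved, stated in full; the proofs are below) =====
def Claim_equal_alfaniczny : Prop := ∀ (a : Int) (b : Int) (data : String), Dom_alfaniczny a b data → Pre_alfaniczny a b data → Spec_alfaniczny a b data (alfaniczny a b data)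

-- ===== LEMMAS AND PROOFS =====

theorem cezarWhile_eq (limit v : Int) :
    cezarWhile limit v = if v > limit then (v - (limit - 25)) % 26 + (limit - 25) else v := by
  fun_induction cezarWhile limit v with
  | case1 v h ih => rw [ih]; split_ifs <;> omega
  | case2 v h => simp [h]

-- the table lookup computes szyfrChar for every character of L (value depends only on the key)
theorem getD_build (a b : Int) (L : List Char) (t : PySem.Dict Char Char) (c : Char) :
    (L.foldl (fun t x =>
      match szyfrChar a b x with
      | some e => t.insert x e
      | none => t) t).getD c c
    = if c ∈ L then (szyfrChar a b c).getD (t.getD c c) else t.getD c c := by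
  induction L generalizing t with
  | nil => simp
  | cons x L ih =>
    simp only [List.foldl_cons, ih, List.mem_cons]
    by_cases hx : c = x
    · subst hx
      cases h : szyfrChar a b c with
      | none => simp
      | some e => simp [PySem.Dict.getD_insert_self]
    · cases h : szyfrChar a b x with
      | none => simp [hx]
      | some e =>
        have hg : (t.insert x e).getD c c = t.getD c c := by
          simp [PySem.Dict.getD_insert, hx]
        simp [hg, hx]

-- A's per-character computation equals B's table value
theorem perChar_eq (a b : Int) (c : Char) :
    (let litera : Int := c.toNat
     let litera := if 65 ≤ litera ∧ litera < 91 then cezarWhile 90 (litera * a + b) else litera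
     let litera := if 97 ≤ litera ∧ litera < 123 then cezarWhile 122 (litera * a + b) else litera
     Char.ofNat litera.toNat)
    = (szyfrChar a b c).getD c := by
  have h26 : (0:Int) < 26 := by norm_num
  simp only [szyfrChar, PySem.Int.mod_eq_emod_of_pos h26, cezarWhile_eq]
  split_ifs <;>
    simp only [Option.getD_some, Option.getD_none] <;>
    first
      | (exfalso; omega)
      | (congr 1; omega)
      | simp

theorem alfaniczny_spec : Claim_equal_alfaniczny := by
  intro a b data _ _
  unfold Spec_alfaniczny alfaniczny alfaniczny_alt
  rw [PySem.List.foldl_append_singleton_eq_map]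
  simp only [List.nil_append]
  congr 1
  apply List.map_congr_left
  intro c hc
  rw [getD_build, if_pos ((PySem.Set.mem_ofList _ _).mpr hc), PySem.Dict.getD_empty]
  exact perChar_eq a b c
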